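-- pv_equiv track=rewrite | github.com/gagiuntoli/Codility | palladium_2020.py | solution
-- ===== SOURCE A (Python) =====
-- def comp_max(H, i0, i1):
--     m = H[i0]
--     for i in range(i0,i1+1):
--         m = max(m, H[i])
--     return m
--
-- def solution(H):
--     area_min = comp_max(H,0,len(H)-1) * len(H)
--     for i in range(0, len(H) - 1):
--         max_left = comp_max(H,0,i)
--         max_right = comp_max(H,i+1,len(H)-1)
--         area = max_left * (i + 1) + max_right * (len(H) - i - 1)
--         area_min = min(area, area_min)
--     return area_min
-- ===== SOURCE B (Python) =====
-- def solution(H):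
--     # O(n): prefix/suffix running maxima, each split evaluated in O(1)
--     n = len(H)
--     pre = []
--     m = H[0]
--     for h in H:
--         if h > m:
--             m = h
--         pre.append(m)
--     suf = [0] * n
--     m = H[-1]
--     for i in range(n - 1, -1, -1):
--         if H[i] > m:
--             m = H[i]
--         suf[i] = m
--     best = suf[0] * n
--     for i in range(n - 1):
--         a = pre[i] * (i + 1) + suf[i + 1] * (n - i - 1)
--         if a < best:
--             best = a
--     return best
-- ===== Notes on version B (the rewrite author's own statement) =====
-- stated objective: faster
-- what changed: Replaces the per-split rescans of comp_max (each O(n)) by prefix-maximum and suffix-maximum arrays computed once, so every split cost is evaluated in O(1).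
-- outside the precondition, e.g. on solution([]): A raises IndexError, B raises IndexError
import Mathlib
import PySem

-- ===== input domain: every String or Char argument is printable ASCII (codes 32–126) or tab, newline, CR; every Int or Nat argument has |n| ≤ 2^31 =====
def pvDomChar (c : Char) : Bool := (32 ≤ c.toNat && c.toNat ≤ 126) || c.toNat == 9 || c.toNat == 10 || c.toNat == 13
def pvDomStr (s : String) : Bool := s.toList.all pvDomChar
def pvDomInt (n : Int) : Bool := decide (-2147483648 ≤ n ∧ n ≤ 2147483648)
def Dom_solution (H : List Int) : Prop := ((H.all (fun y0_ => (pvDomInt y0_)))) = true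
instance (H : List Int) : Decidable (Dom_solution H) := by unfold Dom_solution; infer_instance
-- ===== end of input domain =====

-- B replaces A's O(n) rescan per split by prefix/suffix running-maximum arrays computed once; return values proved equal on all nonempty lists.

-- ===== PORT A =====
-- comp_max(H, i0, i1): m = H[i0]; for i in range(i0, i1+1): m = max(m, H[i]).
-- H[i] ported as pyGetD (the default is never reached: Pre_ excludes the empty list, the only input where A's indices go out of range).
def compMax (H : List Int) (i0 i1 : Int) : Int :=
  (PySem.List.pyRange i0 (i1 + 1) 1).foldl
    (fun m i => max m (PySem.List.pyGetD H i 0))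
    (PySem.List.pyGetD H i0 0)

def solution (H : List Int) : Int :=
  let n : Int := H.length
  (PySem.List.pyRange 0 (n - 1) 1).foldl
    (fun areaMin i =>
      let maxLeft := compMax H 0 i
      let maxRight := compMax H (i + 1) (n - 1)
      let area := maxLeft * (i + 1) + maxRight * (n - i - 1)
      min area areaMin)
    (compMax H 0 (n - 1) * n)

-- ===== PORT B =====
-- running-maximum scan: m starts at the seed, is bumped when h > m, each value is recorded
def scanMax (m : Int) : List Int → List Int
  | [] => []
  | h :: t =>
    let m' := if h > m then h else m
    m' :: scanMax m' t

def solution_alt (H : List Int) : Int :=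
  let n : Int := H.length
  let pre := scanMax (PySem.List.pyGetD H 0 0) H
  let suf := (scanMax (PySem.List.pyGetD H (-1) 0) H.reverse).reverse
  (PySem.List.pyRange 0 (n - 1) 1).foldl
    (fun best i =>
      let a := PySem.List.pyGetD pre i 0 * (i + 1) + PySem.List.pyGetD suf (i + 1) 0 * (n - i - 1)
      if a < best then a else best)
    (PySem.List.pyGetD suf 0 0 * n)

-- ===== PRECONDITION & SPEC =====
-- On the empty list both A and B raise IndexError (H[0]); Pre_ excludes exactly that input.
def Pre_solution (H : List Int) : Prop := H ≠ []
instance (H : List Int) : Decidable (Pre_solution H) := by unfold Pre_solution; infer_instance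
def pvWitness_solution : List Int := [3, 1, 4]

def Spec_solution (H : List Int) (out : Int) : Prop := out = solution_alt H
instance (H : List Int) (out : Int) : Decidable (Spec_solution H out) := by unfold Spec_solution; infer_instance

-- ===== CLAIM (what is proved, stated in full; the proofs are below) =====
def Claim_equal_solution : Prop := ∀ (H : List Int), Dom_solution H → Pre_solution H → Spec_solution H (solution H)

-- ===== LEMMAS AND PROOFS =====

theorem scanMax_if_eq_max (m h : Int) : (if h > m then h else m) = max m h := by
  split <;> omega

@[simp] theorem length_scanMax (m : Int) (l : List Int) : (scanMax m l).length = l.length := by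
  induction l generalizing m with
  | nil => rfl
  | cons h t ih => simp [scanMax, ih]

-- k-th entry of the running-maximum scan is the fold of max over the first k+1 elements
theorem scanMax_getD (l : List Int) (m : Int) (k : Nat) (hk : k < l.length) :
    (scanMax m l).getD k 0 = (l.take (k + 1)).foldl max m := by
  induction l generalizing m k with
  | nil => simp at hk
  | cons h t ih =>
    cases k with
    | zero => simp [scanMax, scanMax_if_eq_max]
    | succ k =>
      simp only [scanMax, scanMax_if_eq_max, List.take_succ_cons, List.foldl_cons, List.getD_cons_succ]
      exact ih _ _ (by simpa using hk)

-- seed rearrangement for foldl max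
theorem foldl_max_seed (l : List Int) (s t : Int) :
    l.foldl max (max s t) = max s (l.foldl max t) := by
  induction l generalizing t with
  | nil => rfl
  | cons h r ih =>
    simp only [List.foldl_cons]
    rw [max_assoc, ih]

-- a seed that occurs in the list is absorbed
theorem foldl_max_absorb (l : List Int) (x : Int) (hx : x ∈ l) (s : Int) :
    l.foldl max (max s x) = l.foldl max s := by
  induction l generalizing s with
  | nil => simp at hx
  | cons h r ih =>
    simp only [List.foldl_cons]
    rcases List.mem_cons.mp hx with rfl | hx'
    · rw [max_assoc, max_self]
    · rw [max_right_comm]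
      exact ih hx' (max s h)

-- two seeds both occurring in the list give the same fold
theorem foldl_max_seed_irrel (l : List Int) (x y : Int) (hx : x ∈ l) (hy : y ∈ l) :
    l.foldl max x = l.foldl max y := by
  have h1 := foldl_max_absorb l y hy x
  have h2 := foldl_max_absorb l x hx y
  rw [max_comm x y] at h1
  rw [← h1, ← h2]

-- folding max over the reverse equals folding over the list
theorem foldl_max_reverse (l : List Int) (s : Int) :
    l.reverse.foldl max s = l.foldl max s := by
  rw [List.foldl_reverse]
  induction l generalizing s with
  | nil => rfl
  | cons h t ih =>
    simp only [List.foldr_cons, List.foldl_cons]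
    rw [ih, max_comm s h, foldl_max_seed]
    exact max_comm _ _

-- Python's H[-1] on a nonempty list is its last element
theorem pyGetD_neg_one (H : List Int) (h : H ≠ []) :
    PySem.List.pyGetD H (-1) 0 = H.getD (H.length - 1) 0 := by
  have hlen : 0 < H.length := List.length_pos_iff.mpr h
  simp only [PySem.List.pyGetD, PySem.List.pyGet?, PySem.List.pyIdx?]
  split
  · omega
  · rw [if_pos (by omega : -(H.length : Int) ≤ -1)]
    norm_num

-- A's index loop over a contiguous range is the fold of max over that segment
theorem foldl_pyRange_seg (H : List Int) (j len : Nat) (m : Int) (hj : j + len ≤ H.length) :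
    (PySem.List.pyRange (j : Int) ((j : Int) + (len : Int)) 1).foldl
      (fun acc i => max acc (PySem.List.pyGetD H i 0)) m
    = ((H.drop j).take len).foldl max m := by
  induction len generalizing m with
  | zero => simp [PySem.List.pyRange_one_eq_nil]
  | succ len ih =>
    have hcast : (j : Int) + ((len + 1 : Nat) : Int) = ((j : Int) + (len : Int)) + 1 := by
      push_cast; ring
    rw [hcast, PySem.List.pyRange_one_succ_right (by omega), List.foldl_append,
      ih m (by omega)]
    simp only [List.foldl_cons, List.foldl_nil]
    have hx : ((j : Int) + (len : Int)) = ((j + len : Nat) : Int) := by push_cast; ring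
    rw [hx, PySem.List.pyGetD_natCast]
    have hlt : len < (H.drop j).length := by
      simp only [List.length_drop]; omega
    rw [List.take_add_one, List.foldl_append, List.getElem?_eq_getElem hlt]
    simp only [Option.toList_some, List.foldl_cons, List.foldl_nil]
    rw [List.getElem_drop, List.getD_eq_getElem _ _ (by omega)]

-- compMax over the segment [j, j+len-1]
theorem compMax_seg (H : List Int) (j len : Nat) (hj : j + len ≤ H.length) :
    compMax H (j : Int) ((j : Int) + (len : Int) - 1)
      = ((H.drop j).take len).foldl max (H.getD j 0) := by
  unfold compMax
  have h1 : (j : Int) + (len : Int) - 1 + 1 = (j : Int) + (len : Int) := by ring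
  rw [h1, foldl_pyRange_seg H j len _ hj, PySem.List.pyGetD_natCast]

-- compMax H 0 i equals the prefix-scan entry at i
theorem compMax_left (H : List Int) (i : Int) (h0 : 0 ≤ i) (h1 : i < (H.length : Int)) :
    compMax H 0 i = PySem.List.pyGetD (scanMax (PySem.List.pyGetD H 0 0) H) i 0 := by
  have hkey := compMax_seg H 0 (i.toNat + 1) (by omega)
  have hc : ((0 : Nat) : Int) + ((i.toNat + 1 : Nat) : Int) - 1 = i := by omega
  rw [hc, Nat.cast_zero, List.drop_zero] at hkey
  have hseed : PySem.List.pyGetD H 0 0 = H.getD 0 0 := by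
    rw [PySem.List.pyGetD_of_nonneg _ _ (by omega)]
    norm_num
  rw [hkey, PySem.List.pyGetD_of_nonneg _ _ h0,
    scanMax_getD H _ i.toNat (by omega), hseed]

-- compMax H j (n-1) equals the suffix-scan entry at j
theorem compMax_right (H : List Int) (j : Nat) (hj : j < H.length) :
    compMax H (j : Int) ((H.length : Int) - 1)
      = PySem.List.pyGetD ((scanMax (PySem.List.pyGetD H (-1) 0) H.reverse).reverse) (j : Int) 0 := by
  have hne : H ≠ [] := by intro h; simp [h] at hj
  have hkey := compMax_seg H j (H.length - j) (by omega)
  have hc : (j : Int) + ((H.length - j : Nat) : Int) - 1 = (H.length : Int) - 1 := by omega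
  rw [hc] at hkey
  have htake : (H.drop j).take (H.length - j) = H.drop j := by
    apply List.take_of_length_le
    simp only [List.length_drop]
    omega
  rw [htake] at hkey
  rw [hkey]
  -- right side: unfold the reversed scan
  have hjR : j < (scanMax (PySem.List.pyGetD H (-1) 0) H.reverse).length := by
    simpa using hj
  rw [PySem.List.pyGetD_natCast, List.getD_reverse j hjR]
  have hlenR : (scanMax (PySem.List.pyGetD H (-1) 0) H.reverse).length = H.length := by simp
  rw [hlenR]
  have hk : H.length - 1 - j < H.reverse.length := by
    rw [List.length_reverse]
    omega
  rw [scanMax_getD H.reverse _ (H.length - 1 - j) hk,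
    show H.length - 1 - j + 1 = H.length - j by omega]
  have htr : H.reverse.take (H.length - j) = (H.drop j).reverse := by
    rw [List.take_reverse, show H.length - (H.length - j) = j by omega]
  rw [htr, foldl_max_reverse]
  -- both folds over H.drop j, seeds H[j] and H[len-1], both members of H.drop j
  apply foldl_max_seed_irrel
  · rw [List.getD_eq_getElem _ _ (by omega)]
    have h1 : H[j] = (H.drop j)[0]'(by simp only [List.length_drop]; omega) := by
      simp [List.getElem_drop]
    rw [h1]
    exact List.getElem_mem _
  · rw [pyGetD_neg_one H hne, List.getD_eq_getElem _ _ (by omega)]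
    have h2 : H[H.length - 1]'(by omega)
        = (H.drop j)[H.length - 1 - j]'(by simp only [List.length_drop]; omega) := by
      rw [List.getElem_drop]
      congr 1
      omega
    rw [h2]
    exact List.getElem_mem _

theorem min_eq_ite (a b : Int) : min a b = if a < b then a else b := by
  rw [min_def]
  split <;> split <;> omega

-- ===== VERDICT (by name: the statement is the Claim_ definition above) =====
theorem solution_spec : Claim_equal_solution := by
  unfold Claim_equal_solution
  intro H _ hpre
  unfold Spec_solution solution solution_alt
  simp only []
  have hlen : 0 < H.length := List.length_pos_iff.mpr hpre
  -- equal initial values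
  have h0 := compMax_right H 0 hlen
  rw [Nat.cast_zero] at h0
  rw [h0]
  -- equal loop bodies on every index of the range
  apply PySem.List.foldl_congr_mem
  intro acc i hi
  rw [PySem.List.mem_pyRange_one] at hi
  have hL := compMax_left H i hi.1 (by omega)
  have hR := compMax_right H (i.toNat + 1) (by omega)
  have hcast : ((i.toNat + 1 : Nat) : Int) = i + 1 := by omega
  rw [hcast] at hR
  rw [hL, hR]
  exact min_eq_ite _ _
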